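-- pv_equiv track=rewrite | github.com/b-boczon/b_boczon_python_for_dqe | task4_2.py | build_final_result
-- ===== SOURCE A (Python) =====
-- def build_final_result(dictionaries, key_sources):
--     """This function iterates through key_sources to construct the final result dictionary, check if the key appears in
--     more than one dictionary, if yes, append the index of the dictionary with the highest value to the key,
--     if no, ads normally
--     """
--     result = {}
--
--     for key, (value, i) in key_sources.items():
--         # check if the key appears in more than one dictionary
--         if sum(key in d for d in dictionaries) > 1:
--             # if yes, append the index of the dictionary with the highest value to the key
--             result[f"{key}_{i}"] = value
--         else:
--             # if the key is only in one dictionary, add normally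
--             result[key] = value
--     return result
-- ===== SOURCE B (Python) =====
-- def build_final_result(dictionaries, key_sources):
--     # One pass over all dictionaries collecting the set of keys that occur in
--     # at least two of them (seen/dup two-set sweep), then a dict comprehension
--     # renaming exactly the duplicated keys.
--     seen, dup = set(), set()
--     for d in dictionaries:
--         for k in d:
--             if k in seen:
--                 dup.add(k)
--             else:
--                 seen.add(k)
--     return {(f"{key}_{i}" if key in dup else key): value
--             for key, (value, i) in key_sources.items()}
-- ===== Notes on version B (the rewrite author's own statement) =====
-- stated objective: faster
-- what changed: B sweeps all dictionaries once with a seen/dup pair of sets to collect keys occurring in at least two dictionaries, then builds the result in a single dict comprehension with one O(1) set lookup per source key, replacing A's per-key indicator-sum scan over every dictionary.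
import Mathlib
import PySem

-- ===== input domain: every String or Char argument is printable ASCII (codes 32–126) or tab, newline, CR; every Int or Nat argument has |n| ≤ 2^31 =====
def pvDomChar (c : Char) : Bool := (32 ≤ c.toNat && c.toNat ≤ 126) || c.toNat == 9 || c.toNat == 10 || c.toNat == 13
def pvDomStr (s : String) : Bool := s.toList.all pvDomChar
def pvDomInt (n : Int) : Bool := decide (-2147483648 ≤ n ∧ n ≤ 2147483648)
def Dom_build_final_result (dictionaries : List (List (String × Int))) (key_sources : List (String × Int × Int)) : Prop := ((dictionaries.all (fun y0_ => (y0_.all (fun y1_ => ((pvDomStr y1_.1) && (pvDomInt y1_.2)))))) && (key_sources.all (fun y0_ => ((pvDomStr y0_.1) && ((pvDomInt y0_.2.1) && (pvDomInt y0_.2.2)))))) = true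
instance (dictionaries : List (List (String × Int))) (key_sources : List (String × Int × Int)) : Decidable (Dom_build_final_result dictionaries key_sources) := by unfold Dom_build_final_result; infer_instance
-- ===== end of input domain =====

-- B replaces A's per-key scan over all dictionaries by a seen/dup two-set sweep done once plus a dict-comprehension pass (asymptotically faster).


-- ===== PORT A =====
-- The dict parameters arrive as assoc lists; PySem.Dict.ofList is the dict() the caller built
-- ('key in d' = Dict.contains, 'key_sources.items()' = items of that dict).
def build_final_result (dictionaries : List (List (String × Int))) (key_sources : List (String × Int × Int)) : List (String × Int) :=
  (((PySem.Dict.ofList key_sources).items.foldl (fun result p =>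
      if (dictionaries.map (fun d => if (PySem.Dict.ofList d).contains p.1 then (1 : Int) else 0)).sum > 1 then
        result.insert (p.1 ++ "_" ++ PySem.Int.toStr p.2.2) p.2.1
      else
        result.insert p.1 p.2.1)
    PySem.Dict.empty)).items

-- ===== PORT B =====
-- seen/dup sweep: 'for d in dictionaries: for k in d: dup.add(k) if k in seen else seen.add(k)'.
def pvSeenDup (dictionaries : List (List (String × Int))) : PySem.Set String × PySem.Set String :=
  dictionaries.foldl (fun sd d =>
    (PySem.Dict.ofList d).keys.foldl (fun sd k =>
      if PySem.Set.contains sd.1 k then (sd.1, PySem.Set.add sd.2 k)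
      else (PySem.Set.add sd.1 k, sd.2)) sd)
    (PySem.Set.empty, PySem.Set.empty)

-- the dict comprehension: map each item to its (possibly renamed) pair, then dict() of that list.
def build_final_result_alt (dictionaries : List (List (String × Int))) (key_sources : List (String × Int × Int)) : List (String × Int) :=
  let dup := (pvSeenDup dictionaries).2
  (PySem.Dict.ofList ((PySem.Dict.ofList key_sources).items.map (fun p =>
    (if PySem.Set.contains dup p.1 then p.1 ++ "_" ++ PySem.Int.toStr p.2.2 else p.1, p.2.1)))).items

-- ===== PRECONDITION & SPEC =====
def Spec_build_final_result (dictionaries : List (List (String × Int))) (key_sources : List (String × Int × Int)) (out : List (String × Int)) : Prop := out = build_final_result_alt dictionaries key_sources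
instance (dictionaries : List (List (String × Int))) (key_sources : List (String × Int × Int)) (out : List (String × Int)) : Decidable (Spec_build_final_result dictionaries key_sources out) := by unfold Spec_build_final_result; infer_instance

-- ===== CLAIM (what is proved, stated in full; the proofs are below) =====
def Claim_equal_build_final_result : Prop := ∀ (dictionaries : List (List (String × Int))) (key_sources : List (String × Int × Int)), Dom_build_final_result dictionaries key_sources → Spec_build_final_result dictionaries key_sources (build_final_result dictionaries key_sources)

-- ===== LEMMAS AND PROOFS =====

-- Inner sweep over one dict's (nodup) key list: seen gains the keys, dup gains the keys already seen.
theorem seenDup_inner (ks : List String) (hnd : ks.Nodup) (s d : PySem.Set String) (k : String) :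
    (k ∈ (ks.foldl (fun sd k =>
        if PySem.Set.contains sd.1 k then (sd.1, PySem.Set.add sd.2 k)
        else (PySem.Set.add sd.1 k, sd.2)) (s, d)).1 ↔ k ∈ s ∨ k ∈ ks) ∧
    (k ∈ (ks.foldl (fun sd k =>
        if PySem.Set.contains sd.1 k then (sd.1, PySem.Set.add sd.2 k)
        else (PySem.Set.add sd.1 k, sd.2)) (s, d)).2 ↔ k ∈ d ∨ (k ∈ s ∧ k ∈ ks)) := by
  induction ks generalizing s d with
  | nil => simp
  | cons k' ks ih =>
    obtain ⟨hk', hnd'⟩ := List.nodup_cons.mp hnd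
    simp only [List.foldl_cons]
    by_cases hs : PySem.Set.contains s k' = true
    · have hks' : k' ∈ s := (PySem.Set.contains_iff s k').mp hs
      rw [if_pos hs]
      obtain ⟨h1, h2⟩ := ih hnd' s (PySem.Set.add d k')
      refine ⟨h1.trans ?_, h2.trans ?_⟩
      · constructor
        · rintro (h | h)
          · exact Or.inl h
          · exact Or.inr (List.mem_cons_of_mem _ h)
        · rintro (h | h)
          · exact Or.inl h
          · rcases List.mem_cons.mp h with h | h
            · exact Or.inl (h ▸ hks')
            · exact Or.inr h
      · rw [PySem.Set.mem_add]
        constructor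
        · rintro ((h | h) | ⟨h1', h2'⟩)
          · exact Or.inl h
          · exact Or.inr ⟨h ▸ hks', h ▸ List.mem_cons_self⟩
          · exact Or.inr ⟨h1', List.mem_cons_of_mem _ h2'⟩
        · rintro (h | ⟨h1', h2'⟩)
          · exact Or.inl (Or.inl h)
          · rcases List.mem_cons.mp h2' with h | h
            · exact Or.inl (Or.inr h)
            · exact Or.inr ⟨h1', h⟩
    · have hks' : k' ∉ s := fun h => hs ((PySem.Set.contains_iff s k').mpr h)
      rw [if_neg hs]
      obtain ⟨h1, h2⟩ := ih hnd' (PySem.Set.add s k') d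
      refine ⟨h1.trans ?_, h2.trans ?_⟩
      · rw [PySem.Set.mem_add]
        constructor
        · rintro ((h | h) | h)
          · exact Or.inl h
          · exact Or.inr (h ▸ List.mem_cons_self)
          · exact Or.inr (List.mem_cons_of_mem _ h)
        · rintro (h | h)
          · exact Or.inl (Or.inl h)
          · rcases List.mem_cons.mp h with h | h
            · exact Or.inl (Or.inr h)
            · exact Or.inr h
      · constructor
        · rintro (h | ⟨h1', h2'⟩)
          · exact Or.inl h
          · rcases (PySem.Set.mem_add _ _ _).mp h1' with h | h
            · exact Or.inr ⟨h, List.mem_cons_of_mem _ h2'⟩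
            · exact absurd (h ▸ h2') hk'
        · rintro (h | ⟨h1', h2'⟩)
          · exact Or.inl h
          · rcases List.mem_cons.mp h2' with h | h
            · exact absurd (h ▸ h1') hks'
            · exact Or.inr ⟨(PySem.Set.mem_add _ _ _).mpr (Or.inl h1'), h⟩

-- Outer sweep: membership in the final dup set counts dictionaries containing the key.
theorem seenDup_outer (ds : List (List (String × Int))) (s d : PySem.Set String) (k : String) :
    (k ∈ (ds.foldl (fun sd dd =>
        (PySem.Dict.ofList dd).keys.foldl (fun sd k =>
          if PySem.Set.contains sd.1 k then (sd.1, PySem.Set.add sd.2 k)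
          else (PySem.Set.add sd.1 k, sd.2)) sd) (s, d)).1 ↔
      k ∈ s ∨ 1 ≤ ds.countP (fun dd => (PySem.Dict.ofList dd).contains k)) ∧
    (k ∈ (ds.foldl (fun sd dd =>
        (PySem.Dict.ofList dd).keys.foldl (fun sd k =>
          if PySem.Set.contains sd.1 k then (sd.1, PySem.Set.add sd.2 k)
          else (PySem.Set.add sd.1 k, sd.2)) sd) (s, d)).2 ↔
      k ∈ d ∨ (k ∈ s ∧ 1 ≤ ds.countP (fun dd => (PySem.Dict.ofList dd).contains k)) ∨
      2 ≤ ds.countP (fun dd => (PySem.Dict.ofList dd).contains k)) := by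
  induction ds generalizing s d with
  | nil => simp
  | cons dd ds ih =>
    simp only [List.foldl_cons]
    have hin := seenDup_inner (PySem.Dict.ofList dd).keys (PySem.Dict.nodup_keys_ofList dd) s d k
    have hmem : k ∈ (PySem.Dict.ofList dd).keys ↔ (PySem.Dict.ofList dd).contains k = true :=
      (PySem.Dict.contains_iff_mem_keys _ _).symm
    set st := (PySem.Dict.ofList dd).keys.foldl (fun sd k =>
          if PySem.Set.contains sd.1 k then (sd.1, PySem.Set.add sd.2 k)
          else (PySem.Set.add sd.1 k, sd.2)) (s, d) with hst
    obtain ⟨hi1, hi2⟩ := hin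
    have ihst := ih st.1 st.2
    rw [show (st.1, st.2) = st from rfl] at ihst
    obtain ⟨ho1, ho2⟩ := ihst
    by_cases hc : (PySem.Dict.ofList dd).contains k = true
    · have hcp : List.countP (fun dd => (PySem.Dict.ofList dd).contains k) (dd :: ds)
          = List.countP (fun dd => (PySem.Dict.ofList dd).contains k) ds + 1 := by
        simp [hc]
      rw [hcp]
      constructor
      · rw [ho1, hi1]
        constructor
        · rintro h; exact Or.inr (by omega)
        · intro h; exact Or.inl (Or.inr (hmem.mpr hc))
      · rw [ho2, hi1, hi2]
        have hkk : k ∈ (PySem.Dict.ofList dd).keys := hmem.mpr hc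
        constructor
        · rintro ((h | ⟨h1, _⟩) | (⟨(h | _), hcnt⟩ | hcnt))
          · exact Or.inl h
          · exact Or.inr (Or.inl ⟨h1, by omega⟩)
          · exact Or.inr (Or.inl ⟨h, by omega⟩)
          · exact Or.inr (Or.inr (by omega))
          · exact Or.inr (Or.inr (by omega))
        · rintro (h | ⟨h1, _⟩ | hcnt)
          · exact Or.inl (Or.inl h)
          · exact Or.inl (Or.inr ⟨h1, hkk⟩)
          · by_cases hc' : 1 ≤ ds.countP (fun dd => (PySem.Dict.ofList dd).contains k)
            · exact Or.inr (Or.inl ⟨Or.inr hkk, hc'⟩)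
            · exact Or.inr (Or.inl ⟨Or.inr hkk, by omega⟩)
    · have hkk : k ∉ (PySem.Dict.ofList dd).keys := fun h => hc (hmem.mp h)
      have hcp : List.countP (fun dd => (PySem.Dict.ofList dd).contains k) (dd :: ds)
          = List.countP (fun dd => (PySem.Dict.ofList dd).contains k) ds := by
        simp [hc]
      rw [hcp]
      constructor
      · rw [ho1, hi1]
        constructor
        · rintro ((h | h) | h)
          · exact Or.inl h
          · exact absurd h hkk
          · exact Or.inr (by omega)
        · rintro (h | h)
          · exact Or.inl (Or.inl h)
          · exact Or.inr (by omega)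
      · rw [ho2, hi1, hi2]
        constructor
        · rintro ((h | ⟨_, h2⟩) | (⟨(h | h), hcnt⟩ | hcnt))
          · exact Or.inl h
          · exact absurd h2 hkk
          · exact Or.inr (Or.inl ⟨h, by omega⟩)
          · exact absurd h hkk
          · exact Or.inr (Or.inr (by omega))
        · rintro (h | ⟨h1, hcnt⟩ | hcnt)
          · exact Or.inl (Or.inl h)
          · exact Or.inr (Or.inl ⟨Or.inl h1, by omega⟩)
          · exact Or.inr (Or.inr (by omega))

-- A's indicator sum is the count of dictionaries containing the key.
theorem sum_indicator_eq_countP (ds : List (List (String × Int))) (k : String) :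
    (ds.map (fun d => if (PySem.Dict.ofList d).contains k then (1 : Int) else 0)).sum
      = (ds.countP (fun d => (PySem.Dict.ofList d).contains k) : Int) := by
  induction ds with
  | nil => simp
  | cons d ds ih =>
    simp only [List.map_cons, List.sum_cons, List.countP_cons, ih]
    by_cases h : (PySem.Dict.ofList d).contains k = true <;> simp [h] <;> ring

-- B's branch test equals A's 'appears in more than one dictionary' test.
theorem dup_contains_iff (ds : List (List (String × Int))) (k : String) :
    PySem.Set.contains (pvSeenDup ds).2 k = true ↔
      (ds.map (fun d => if (PySem.Dict.ofList d).contains k then (1 : Int) else 0)).sum > 1 := by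
  rw [PySem.Set.contains_iff, sum_indicator_eq_countP]
  have h := (seenDup_outer ds PySem.Set.empty PySem.Set.empty k).2
  unfold pvSeenDup
  rw [h]
  simp only [PySem.Set.empty]
  constructor
  · rintro (h | ⟨h, _⟩ | h)
    · cases h
    · cases h
    · omega
  · intro h; exact Or.inr (Or.inr (by omega))

-- ===== VERDICT (by name: the statement is the Claim_ definition above) =====
theorem build_final_result_spec : Claim_equal_build_final_result := by
  intro dictionaries key_sources _
  unfold Spec_build_final_result build_final_result build_final_result_alt
  show _ = (PySem.Dict.ofList ((PySem.Dict.ofList key_sources).items.map _)).items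
  have hof : ∀ (l : List (String × Int)),
      PySem.Dict.ofList l = l.foldl (fun d p => d.insert p.1 p.2) PySem.Dict.empty := fun _ => rfl
  rw [hof ((PySem.Dict.ofList key_sources).items.map _), List.foldl_map]
  congr 1
  apply PySem.List.foldl_congr_mem
  intro result p _
  by_cases hc : PySem.Set.contains (pvSeenDup dictionaries).2 p.1 = true
  · rw [if_pos hc, if_pos ((dup_contains_iff dictionaries p.1).mp hc)]
  · rw [if_neg hc, if_neg (fun h => hc ((dup_contains_iff dictionaries p.1).mpr h))]
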